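-- pv_equiv track=rewrite | github.com/jueuunn7/cote | 8p/noval.py | has_seven
-- ===== SOURCE A (Python) =====
-- def has_seven(n: int) -> bool:
--     if n <= 0:
--         return False
--     elif n % 7 == 0:
--         return True
--     elif n % 10 == 7:
--         return True
--     return has_seven(n // 10)
-- ===== SOURCE B (Python) =====
-- def has_seven(n: int) -> bool:
--     while n > 0:
--         if n % 7 == 0 or n % 10 == 7:
--             return True
--         n //= 10
--     return False
-- ===== Notes on version B (the rewrite author's own statement) =====
-- stated objective: idiomatic
-- what changed: Replaces the tail recursion with an explicit iterative while-loop over the shrinking value, keeping the per-step divisibility and last-digit tests inside the loop.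
import Mathlib
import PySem

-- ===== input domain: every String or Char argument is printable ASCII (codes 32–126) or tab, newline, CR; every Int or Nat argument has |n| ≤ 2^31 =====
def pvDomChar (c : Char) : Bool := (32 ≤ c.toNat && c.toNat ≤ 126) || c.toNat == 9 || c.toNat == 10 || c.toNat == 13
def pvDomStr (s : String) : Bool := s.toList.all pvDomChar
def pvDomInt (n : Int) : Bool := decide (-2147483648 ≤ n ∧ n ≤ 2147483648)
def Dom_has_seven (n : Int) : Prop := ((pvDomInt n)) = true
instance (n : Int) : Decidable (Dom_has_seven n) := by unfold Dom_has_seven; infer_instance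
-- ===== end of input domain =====

-- B rewrites A's tail recursion as an explicit iterative while-loop (same per-step tests); objective: idiomatic, no speed claim.

-- ===== PORT A =====
def has_seven (n : Int) : Bool :=
  if n ≤ 0 then false
  else if PySem.Int.mod n 7 = 0 then true
  else if PySem.Int.mod n 10 = 7 then true
  else has_seven (PySem.Int.floordiv n 10)
termination_by n.toNat
decreasing_by
  rw [PySem.Int.floordiv_eq_ediv_of_pos (by omega)]
  omega

-- ===== PORT B =====
-- B's while-loop: it only runs while n > 0, so the loop state is tracked exactly as a Nat
-- (the guard 'm ≠ 0' is Python's 'n > 0'; '% ' and '//' on positive ints coincide with Nat's).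
def hasSevenLoop (m : Nat) : Bool :=
  if m = 0 then false
  else if m % 7 == 0 || m % 10 == 7 then true
  else hasSevenLoop (m / 10)
decreasing_by exact Nat.div_lt_self (by omega) (by omega)

def has_seven_alt (n : Int) : Bool := hasSevenLoop n.toNat

-- ===== PRECONDITION & SPEC =====
def Spec_has_seven (n : Int) (out : Bool) : Prop := out = has_seven_alt n
instance (n : Int) (out : Bool) : Decidable (Spec_has_seven n out) := by unfold Spec_has_seven; infer_instance

-- ===== CLAIM (what is proved, stated in full; the proofs are below) =====
def Claim_equal_has_seven : Prop := ∀ (n : Int), Dom_has_seven n → Spec_has_seven n (has_seven n)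

-- ===== LEMMAS AND PROOFS =====
theorem has_seven_eq_loop (n : Int) : has_seven n = hasSevenLoop n.toNat := by
  induction n using has_seven.induct with
  | case1 n h =>
    rw [has_seven, hasSevenLoop]
    simp [h, Int.toNat_of_nonpos h]
  | case2 n h h7 =>
    have hn : ((n.toNat : Int)) = n := Int.toNat_of_nonneg (by omega)
    rw [has_seven, hasSevenLoop]
    have : PySem.Int.mod n 7 = ((n.toNat % 7 : Nat) : Int) := by
      rw [← hn]; exact_mod_cast PySem.Int.mod_natCast n.toNat 7
    simp only [this] at h7 ⊢
    simp [h, h7]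
    omega
  | case3 n h h7 h10 =>
    have hn : ((n.toNat : Int)) = n := Int.toNat_of_nonneg (by omega)
    have m7 : PySem.Int.mod n 7 = ((n.toNat % 7 : Nat) : Int) := by
      rw [← hn]; exact_mod_cast PySem.Int.mod_natCast n.toNat 7
    have m10 : PySem.Int.mod n 10 = ((n.toNat % 10 : Nat) : Int) := by
      rw [← hn]; exact_mod_cast PySem.Int.mod_natCast n.toNat 10
    rw [m7] at h7; rw [m10] at h10
    have H7 : n.toNat % 7 ≠ 0 := by exact_mod_cast h7
    have H10 : n.toNat % 10 = 7 := by exact_mod_cast h10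
    have hm : n.toNat ≠ 0 := by omega
    have d10 : n % 10 = 7 := by omega
    rw [has_seven, hasSevenLoop]
    simp [h, hm, d10, H10]
  | case4 n h h7 h10 ih =>
    have hn : ((n.toNat : Int)) = n := Int.toNat_of_nonneg (by omega)
    have m7 : PySem.Int.mod n 7 = ((n.toNat % 7 : Nat) : Int) := by
      rw [← hn]; exact_mod_cast PySem.Int.mod_natCast n.toNat 7
    have m10 : PySem.Int.mod n 10 = ((n.toNat % 10 : Nat) : Int) := by
      rw [← hn]; exact_mod_cast PySem.Int.mod_natCast n.toNat 10
    have hd : PySem.Int.floordiv n 10 = ((n.toNat / 10 : Nat) : Int) := by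
      rw [← hn]; exact_mod_cast PySem.Int.floordiv_natCast n.toNat 10
    rw [m7] at h7; rw [m10] at h10
    have H7 : n.toNat % 7 ≠ 0 := by exact_mod_cast h7
    have H10 : n.toNat % 10 ≠ 7 := by exact_mod_cast h10
    have hm : n.toNat ≠ 0 := by omega
    rw [hd] at ih
    rw [has_seven, hasSevenLoop, hd, ih]
    have d7 : ¬ (7 ∣ n) := by omega
    have d10 : ¬ (n % 10 = 7) := by omega
    have dx : (max n 0 / 10).toNat = n.toNat / 10 := by omega
    simp [h, hm, d7, d10, dx]
    rintro (hx | hx)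
    · exact absurd hx H7
    · exact absurd hx H10

-- ===== VERDICT (by name: the statement is the Claim_ definition above) =====
theorem has_seven_spec : Claim_equal_has_seven := by
  intro n _
  unfold Spec_has_seven has_seven_alt
  exact has_seven_eq_loop n
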